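-- pv_equiv track=rewrite | github.com/retomydb/retomybd | scraper/scraper/hf_client.py | _detect_tensor_type
-- ===== SOURCE A (Python) =====
-- from typing import Optional, List, Dict, Any
--
-- def _detect_tensor_type(tags: List[str], siblings: list) -> Optional[str]:
--     tag_set = {t.lower() for t in tags}
--     types = []
--     if "safetensors" in tag_set or any(
--         s.get("rfilename", "").endswith(".safetensors") for s in siblings
--     ):
--         types.append("safetensors")
--     if any(s.get("rfilename", "").endswith(".bin") for s in siblings):
--         types.append("pytorch")
--     if "gguf" in tag_set or any(
--         s.get("rfilename", "").endswith(".gguf") for s in siblings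
--     ):
--         types.append("gguf")
--     if any(s.get("rfilename", "").endswith(".onnx") for s in siblings):
--         types.append("onnx")
--     return ", ".join(types) if types else None
-- ===== SOURCE B (Python) =====
-- from typing import Optional, List
--
--
-- def _detect_tensor_type(tags: List[str], siblings: list) -> Optional[str]:
--     tag_set = {t.lower() for t in tags}
--     # single pass over siblings: record which file-type markers are present
--     present = set()
--     for s in siblings:
--         fn = s.get("rfilename", "")
--         if fn.endswith(".safetensors"):
--             present.add("safetensors")
--         if fn.endswith(".bin"):
--             present.add("pytorch")
--         if fn.endswith(".gguf"):
--             present.add("gguf")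
--         if fn.endswith(".onnx"):
--             present.add("onnx")
--     types = (
--         (["safetensors"] if "safetensors" in tag_set or "safetensors" in present else [])
--         + (["pytorch"] if "pytorch" in present else [])
--         + (["gguf"] if "gguf" in tag_set or "gguf" in present else [])
--         + (["onnx"] if "onnx" in present else [])
--     )
--     return ", ".join(types) if types else None
-- ===== Notes on version B (the rewrite author's own statement) =====
-- stated objective: alternative
-- what changed: Replaces A's four separate any() scans over siblings with a single pass that materializes a 'present' marker set, which the fixed-order result construction then consults by set lookup.
import Mathlib
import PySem

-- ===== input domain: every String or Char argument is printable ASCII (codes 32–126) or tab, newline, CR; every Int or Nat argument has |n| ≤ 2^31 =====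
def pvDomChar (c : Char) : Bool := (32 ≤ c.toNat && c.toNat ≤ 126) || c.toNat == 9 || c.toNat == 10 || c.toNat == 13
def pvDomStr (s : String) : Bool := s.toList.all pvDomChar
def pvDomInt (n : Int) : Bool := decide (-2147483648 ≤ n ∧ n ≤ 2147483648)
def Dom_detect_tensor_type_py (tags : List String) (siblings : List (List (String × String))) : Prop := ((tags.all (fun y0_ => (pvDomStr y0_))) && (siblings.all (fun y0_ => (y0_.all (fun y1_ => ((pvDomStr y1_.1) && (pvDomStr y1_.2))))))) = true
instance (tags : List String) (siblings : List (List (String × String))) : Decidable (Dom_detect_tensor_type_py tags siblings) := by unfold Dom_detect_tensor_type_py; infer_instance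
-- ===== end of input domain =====

-- B replaces A's four any() scans over siblings by one pass building a 'present' marker set
-- consulted by lookups (objective: alternative decomposition; return value unchanged).

-- ===== PORT A =====
def detect_tensor_type_py (tags : List String) (siblings : List (List (String × String))) : Option String :=
  let tagSet : PySem.Set String := PySem.Set.ofList (tags.map PySem.Str.lower)
  let types : List String := []
  let types := if tagSet.contains "safetensors"
      || siblings.any (fun s => PySem.Str.endswith (PySem.Dict.getD ⟨s⟩ "rfilename" "") ".safetensors")
    then types ++ ["safetensors"] else types
  let types := if siblings.any (fun s => PySem.Str.endswith (PySem.Dict.getD ⟨s⟩ "rfilename" "") ".bin")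
    then types ++ ["pytorch"] else types
  let types := if tagSet.contains "gguf"
      || siblings.any (fun s => PySem.Str.endswith (PySem.Dict.getD ⟨s⟩ "rfilename" "") ".gguf")
    then types ++ ["gguf"] else types
  let types := if siblings.any (fun s => PySem.Str.endswith (PySem.Dict.getD ⟨s⟩ "rfilename" "") ".onnx")
    then types ++ ["onnx"] else types
  if types.isEmpty then none else some (PySem.Str.join ", " types)

-- ===== PORT B =====
-- one sibling's contribution to the marker set
def pvMark (acc : PySem.Set String) (s : List (String × String)) : PySem.Set String :=
  let fn := PySem.Dict.getD ⟨s⟩ "rfilename" ""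
  let acc := if PySem.Str.endswith fn ".safetensors" then acc.add "safetensors" else acc
  let acc := if PySem.Str.endswith fn ".bin" then acc.add "pytorch" else acc
  let acc := if PySem.Str.endswith fn ".gguf" then acc.add "gguf" else acc
  if PySem.Str.endswith fn ".onnx" then acc.add "onnx" else acc

def detect_tensor_type_py_alt (tags : List String) (siblings : List (List (String × String))) : Option String :=
  let tagSet : PySem.Set String := PySem.Set.ofList (tags.map PySem.Str.lower)
  let present : PySem.Set String := siblings.foldl pvMark PySem.Set.empty
  let types : List String :=
    (if tagSet.contains "safetensors" || present.contains "safetensors" then ["safetensors"] else [])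
    ++ (if present.contains "pytorch" then ["pytorch"] else [])
    ++ (if tagSet.contains "gguf" || present.contains "gguf" then ["gguf"] else [])
    ++ (if present.contains "onnx" then ["onnx"] else [])
  if types.isEmpty then none else some (PySem.Str.join ", " types)

-- ===== PRECONDITION & SPEC =====
def Spec_detect_tensor_type_py (tags : List String) (siblings : List (List (String × String))) (out : Option String) : Prop := out = detect_tensor_type_py_alt tags siblings
instance (tags : List String) (siblings : List (List (String × String))) (out : Option String) : Decidable (Spec_detect_tensor_type_py tags siblings out) := by unfold Spec_detect_tensor_type_py; infer_instance

-- ===== CLAIM (what is proved, stated in full; the proofs are below) =====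
def Claim_equal_detect_tensor_type_py : Prop := ∀ (tags : List String) (siblings : List (List (String × String))), Dom_detect_tensor_type_py tags siblings → Spec_detect_tensor_type_py tags siblings (detect_tensor_type_py tags siblings)

-- ===== LEMMAS AND PROOFS =====

lemma pvMark_mem (m : String) (hm : m = "safetensors" ∨ m = "pytorch" ∨ m = "gguf" ∨ m = "onnx")
    (suf : String)
    (hs : (m = "safetensors" → suf = ".safetensors") ∧ (m = "pytorch" → suf = ".bin")
        ∧ (m = "gguf" → suf = ".gguf") ∧ (m = "onnx" → suf = ".onnx"))
    (acc : PySem.Set String) (s : List (String × String)) :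
    (m ∈ pvMark acc s) ↔ (m ∈ acc ∨ PySem.Str.endswith (PySem.Dict.getD ⟨s⟩ "rfilename" "") suf = true) := by
  obtain ⟨h1, h2, h3, h4⟩ := hs
  rcases hm with rfl | rfl | rfl | rfl <;>
    [rw [h1 rfl]; rw [h2 rfl]; rw [h3 rfl]; rw [h4 rfl]] <;>
    simp only [pvMark] <;> split_ifs <;> simp_all [PySem.Set.mem_add]

lemma mem_fold_pvMark (m : String) (hm : m = "safetensors" ∨ m = "pytorch" ∨ m = "gguf" ∨ m = "onnx")
    (suf : String)
    (hs : (m = "safetensors" → suf = ".safetensors") ∧ (m = "pytorch" → suf = ".bin")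
        ∧ (m = "gguf" → suf = ".gguf") ∧ (m = "onnx" → suf = ".onnx"))
    (siblings : List (List (String × String))) (acc : PySem.Set String) :
    (m ∈ siblings.foldl pvMark acc)
      ↔ (m ∈ acc ∨ siblings.any (fun s => PySem.Str.endswith (PySem.Dict.getD ⟨s⟩ "rfilename" "") suf) = true) := by
  induction siblings generalizing acc with
  | nil => simp
  | cons s rest ih =>
      simp only [List.foldl_cons, List.any_cons, ih, pvMark_mem m hm suf hs, Bool.or_eq_true]
      tauto

lemma present_contains (m : String) (hm : m = "safetensors" ∨ m = "pytorch" ∨ m = "gguf" ∨ m = "onnx")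
    (suf : String)
    (hs : (m = "safetensors" → suf = ".safetensors") ∧ (m = "pytorch" → suf = ".bin")
        ∧ (m = "gguf" → suf = ".gguf") ∧ (m = "onnx" → suf = ".onnx"))
    (siblings : List (List (String × String))) :
    PySem.Set.contains (siblings.foldl pvMark PySem.Set.empty) m
      = siblings.any (fun s => PySem.Str.endswith (PySem.Dict.getD ⟨s⟩ "rfilename" "") suf) := by
  rcases h : siblings.any (fun s => PySem.Str.endswith (PySem.Dict.getD ⟨s⟩ "rfilename" "") suf) with _ | _
  · rw [Bool.eq_false_iff]
    intro hc
    rw [PySem.Set.contains_iff, mem_fold_pvMark m hm suf hs] at hc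
    simp only [PySem.Set.empty] at hc
    rcases hc with hc | hc
    · simp at hc
    · rw [hc] at h; simp at h
  · rw [PySem.Set.contains_iff, mem_fold_pvMark m hm suf hs]
    right; exact h

-- ===== VERDICT (by name: the statement is the Claim_ definition above) =====
theorem detect_tensor_type_py_spec : Claim_equal_detect_tensor_type_py := by
  intro tags siblings _
  show detect_tensor_type_py tags siblings = detect_tensor_type_py_alt tags siblings
  simp only [detect_tensor_type_py, detect_tensor_type_py_alt,
    present_contains "safetensors" (by tauto) ".safetensors" (by simp),
    present_contains "pytorch" (by tauto) ".bin" (by simp),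
    present_contains "gguf" (by tauto) ".gguf" (by simp),
    present_contains "onnx" (by tauto) ".onnx" (by simp)]
  split_ifs <;> simp_all
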